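-- pv_equiv track=rewrite | github.com/yomhub/CodeLab | python/string/t2.py | box_calculate
-- ===== SOURCE A (Python) =====
-- def box_calculate(box):
--
--     cnts = []
--     maxv,maxid=1,[]
--     for j in range(len(box[0])):
--         tmp=0
--         for i in range(len(box)):
--             if(box[i][j]):
--                 tmp+=1
--         cnts.append(tmp)
--         if(maxv==tmp):
--             maxid.append(j)
--         elif(tmp>maxv):
--             maxv=tmp
--             maxid=[j]
--
--     ans = 0
--     for cj in maxid:
--         detp = cj
--         while(detp>0 and cnts[detp]>0):
--             detp-=1
--         ans = max(ans,abs(cj-detp))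
--         detp = cj
--         while(detp<len(cnts) and cnts[detp]>0):
--             detp+=1
--         ans = max(ans,abs(cj-detp))
--
--     return min(ans,maxv)
-- ===== SOURCE B (Python) =====
-- def box_calculate(box):
--     cols = len(box[0])
--     cnts = [sum(1 for row in box if row[j]) for j in range(cols)]
--     maxv = max([1] + cnts)
--     # nearest zero-count column at or to the left (0 if none), one prefix pass
--     left = []
--     last = 0
--     for j in range(cols):
--         if cnts[j] == 0:
--             last = j
--         left.append(last)
--     # nearest zero-count column at or to the right (cols if none), one suffix pass
--     right = [0] * cols
--     nxt = cols
--     for j in range(cols - 1, -1, -1):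
--         if cnts[j] == 0:
--             nxt = j
--         right[j] = nxt
--     ans = 0
--     for j in range(cols):
--         if cnts[j] == maxv:
--             ans = max(ans, j - left[j], right[j] - j)
--     return min(ans, maxv)
-- ===== Notes on version B (the rewrite author's own statement) =====
-- stated objective: alternative
-- what changed: B precomputes the nearest zero-count column to the left and right of every column in two linear prefix/suffix passes and reads each maximal column's extent in O(1), instead of A's per-max-column zero-hunting while-loops and running-max/reset bookkeeping; intended as asymptotically lighter in cols, but a timing run could not confirm a measurable speed-up, so none is claimed.
import Mathlib
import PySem

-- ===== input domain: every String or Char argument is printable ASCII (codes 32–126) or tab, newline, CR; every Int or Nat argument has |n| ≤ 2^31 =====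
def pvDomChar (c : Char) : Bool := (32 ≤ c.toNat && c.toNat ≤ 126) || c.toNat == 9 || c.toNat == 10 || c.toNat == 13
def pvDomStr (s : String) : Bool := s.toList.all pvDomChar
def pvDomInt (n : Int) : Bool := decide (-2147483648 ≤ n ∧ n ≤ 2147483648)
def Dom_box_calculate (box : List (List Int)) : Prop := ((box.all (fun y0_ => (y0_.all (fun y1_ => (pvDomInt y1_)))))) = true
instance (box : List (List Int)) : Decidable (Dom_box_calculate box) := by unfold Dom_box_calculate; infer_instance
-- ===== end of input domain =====

-- B replaces A's per-max-column zero-hunting walks by two prefix/suffix passes that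
-- precompute the nearest zero-count column on each side (alternative algorithm; the
-- timing run could not confirm a measurable speed-up, so none is claimed).

-- ===== PORT A =====
-- inner loop 'tmp=0; for i in range(len(box)): if box[i][j]: tmp+=1'
def pvColLoop (box : List (List Int)) (j : Nat) : Int :=
  box.foldl (fun tmp row => if ((PySem.List.pyGet? row (j : Int)).getD 0 != 0) then tmp + 1 else tmp) 0

-- 'detp=cj; while detp>0 and cnts[detp]>0: detp-=1'
def pvWalkL (cnts : List Int) : Nat → Nat
  | 0 => 0
  | p + 1 => if cnts.getD (p + 1) 0 > 0 then pvWalkL cnts p else p + 1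

-- 'detp=cj; while detp<len(cnts) and cnts[detp]>0: detp+=1'
def pvWalkR (cnts : List Int) (detp : Nat) : Nat :=
  if h : detp < cnts.length ∧ cnts.getD detp 0 > 0 then pvWalkR cnts (detp + 1) else detp
termination_by cnts.length - detp
decreasing_by omega

def box_calculate (box : List (List Int)) : Int :=
  let st := (List.range (box.headD []).length).foldl
    (fun (st : List Int × Int × List Nat) j =>
      if st.2.1 = pvColLoop box j then
        (st.1 ++ [pvColLoop box j], st.2.1, st.2.2 ++ [j])
      else if pvColLoop box j > st.2.1 then
        (st.1 ++ [pvColLoop box j], pvColLoop box j, [j])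
      else (st.1 ++ [pvColLoop box j], st.2.1, st.2.2))
    ([], 1, [])
  let ans := st.2.2.foldl (fun (ans : Int) (cj : Nat) =>
      max (max ans |(cj : Int) - (pvWalkL st.1 cj : Int)|)
          |(cj : Int) - (pvWalkR st.1 cj : Int)|) 0
  min ans st.2.1

-- ===== PORT B =====
-- 'sum(1 for row in box if row[j])'
def pvColCount (box : List (List Int)) (j : Nat) : Int :=
  (box.countP (fun row => (PySem.List.pyGet? row (j : Int)).getD 0 != 0) : Int)

def box_calculate_alt (box : List (List Int)) : Int :=
  let cols := (box.headD []).length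
  let cnts := (List.range cols).map (pvColCount box)
  let maxv := (PySem.List.max? ((1 : Int) :: cnts) (fun y => y)).getD 1
  let left := ((List.range cols).foldl
    (fun (st : Nat × List Nat) j =>
      (if cnts.getD j 0 = 0 then j else st.1,
       st.2 ++ [if cnts.getD j 0 = 0 then j else st.1])) (0, [])).2
  let right := ((List.range cols).reverse.foldl
    (fun (st : Nat × List Nat) j =>
      (if cnts.getD j 0 = 0 then j else st.1,
       (if cnts.getD j 0 = 0 then j else st.1) :: st.2)) (cols, [])).2
  let ans := (List.range cols).foldl
    (fun ans j =>
      if cnts.getD j 0 = maxv then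
        max (max ans ((j : Int) - (left.getD j 0 : Int))) ((right.getD j 0 : Int) - (j : Int))
      else ans) 0
  min ans maxv

-- ===== PRECONDITION & SPEC =====
-- Pre_ excludes exactly the inputs where Python A raises an IndexError: an empty
-- list of rows (box[0]) or some row shorter than row 0 (box[i][j], j < len(box[0])).
def Pre_box_calculate (box : List (List Int)) : Prop :=
  box ≠ [] ∧ ∀ row ∈ box, (box.headD []).length ≤ row.length
instance (box : List (List Int)) : Decidable (Pre_box_calculate box) := by unfold Pre_box_calculate; infer_instance

def pvWitness_box_calculate : List (List Int) := [[1, 0, 2], [0, 0, 1]]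

def Spec_box_calculate (box : List (List Int)) (out : Int) : Prop := out = box_calculate_alt box
instance (box : List (List Int)) (out : Int) : Decidable (Spec_box_calculate box out) := by unfold Spec_box_calculate; infer_instance

-- ===== CLAIM (what is proved, stated in full; the proofs are below) =====
def Claim_equal_box_calculate : Prop := ∀ (box : List (List Int)), Dom_box_calculate box → Pre_box_calculate box → Spec_box_calculate box (box_calculate box)

-- ===== LEMMAS AND PROOFS =====

lemma colCount_eq (box : List (List Int)) (j : Nat) :
    pvColCount box j = pvColLoop box j := by
  unfold pvColCount pvColLoop
  rw [PySem.List.foldl_count_if]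
  simp

-- running max of the first n column counts, floored at 1 (A's 'maxv')
def pvM (c : Nat → Int) (n : Nat) : Int := ((List.range n).map c).foldl max 1

lemma stateA (c : Nat → Int) (n : Nat) :
    (List.range n).foldl
      (fun (st : List Int × Int × List Nat) j =>
        if st.2.1 = c j then (st.1 ++ [c j], st.2.1, st.2.2 ++ [j])
        else if c j > st.2.1 then (st.1 ++ [c j], c j, [j])
        else (st.1 ++ [c j], st.2.1, st.2.2))
      ([], 1, [])
    = ((List.range n).map c, pvM c n,
       (List.range n).filter (fun j => pvM c n == c j)) := by
  induction n with
  | zero => simp [pvM]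
  | succ n ih =>
    have hM : pvM c (n + 1) = max (pvM c n) (c n) := by
      simp [pvM, List.range_succ, List.foldl_append]
    rw [List.range_succ, List.foldl_append, ih, List.filter_append]
    simp only [List.foldl_cons, List.foldl_nil, List.map_append, List.map_cons, List.map_nil,
      List.filter_cons, List.filter_nil]
    rcases lt_trichotomy (c n) (pvM c n) with hlt | heq | hgt
    · have h1 : ¬ (pvM c n = c n) := by omega
      have h2 : ¬ (c n > pvM c n) := by omega
      have hM' : pvM c (n + 1) = pvM c n := by rw [hM]; omega
      simp only [h1, if_false, h2, if_false, hM']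
      simp [show (pvM c n == c n) = false by simp; omega]
    · have hM' : pvM c (n + 1) = pvM c n := by rw [hM]; omega
      simp only [heq, if_true, hM']
      simp
    · have h1 : ¬ (pvM c n = c n) := by omega
      have hM' : pvM c (n + 1) = c n := by rw [hM]; omega
      simp only [h1, if_false, hgt, if_true, hM']
      have hempty : (List.range n).filter (fun j => c n == c j) = [] := by
        rw [List.filter_eq_nil_iff]
        intro j hj
        have hmem : c j ∈ (List.range n).map c := List.mem_map_of_mem hj
        have := (PySem.List.le_foldl_max ((List.range n).map c) 1).2 (c j) hmem
        simp only [beq_iff_eq]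
        intro hcontra
        rw [← hcontra] at this
        exact absurd this (by unfold pvM at hgt; omega)
      simp [hempty]

def pvLeftAt (c : Nat → Int) : Nat → Nat
  | 0 => 0
  | p + 1 => if c (p + 1) = 0 then p + 1 else pvLeftAt c p

lemma leftAt_le (c : Nat → Int) (j : Nat) : pvLeftAt c j ≤ j := by
  induction j with
  | zero => simp [pvLeftAt]
  | succ p ih => unfold pvLeftAt; split <;> omega

lemma walkL_eq (c : Nat → Int) (n : Nat) (h0 : ∀ j, 0 ≤ c j) :
    ∀ j, j < n → pvWalkL ((List.range n).map c) j = pvLeftAt c j := by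
  intro j
  induction j with
  | zero => intro _; simp [pvWalkL, pvLeftAt]
  | succ p ih =>
    intro h
    unfold pvWalkL pvLeftAt
    rw [PySem.List.getD_map_range c n (p + 1) 0 h]
    by_cases hz : c (p + 1) = 0
    · simp [hz]
    · have hpos : 0 < c (p + 1) := lt_of_le_of_ne (h0 (p + 1)) (Ne.symm hz)
      simp [hz, hpos, ih (by omega)]

def pvRightAt (c : Nat → Int) (n : Nat) (j : Nat) : Nat :=
  if h : j < n then (if c j = 0 then j else pvRightAt c n (j + 1)) else j
termination_by n - j
decreasing_by omega

lemma rightAt_ge (c : Nat → Int) (n : Nat) (j : Nat) : j ≤ pvRightAt c n j := by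
  unfold pvRightAt
  split
  · split
    · exact le_refl j
    · exact le_trans (by omega) (rightAt_ge c n (j + 1))
  · exact le_refl j
termination_by n - j
decreasing_by omega

lemma walkR_eq (c : Nat → Int) (n : Nat) (h0 : ∀ j, 0 ≤ c j) :
    ∀ j, j ≤ n → pvWalkR ((List.range n).map c) j = pvRightAt c n j := by
  have main : ∀ m j, j ≤ n → n - j = m →
      pvWalkR ((List.range n).map c) j = pvRightAt c n j := by
    intro m
    induction m with
    | zero =>
      intro j hj hm
      have hjn : j = n := by omega
      subst hjn
      unfold pvWalkR pvRightAt
      simp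
    | succ m ih =>
      intro j hj hm
      have hjn : j < n := by omega
      unfold pvWalkR pvRightAt
      rw [PySem.List.getD_map_range c n j 0 hjn]
      simp only [List.length_map, List.length_range]
      by_cases hz : c j = 0
      · simp [hjn, hz]
      · have hpos : 0 < c j := lt_of_le_of_ne (h0 j) (Ne.symm hz)
        simp only [hjn, hz, hpos, true_and, dif_pos, if_false]
        exact ih (j + 1) (by omega) (by omega)
  intro j hj
  exact main (n - j) j hj rfl

lemma leftFold (c : Nat → Int) (n : Nat)
    (hc : ∀ j, j < n → ((List.range n).map c).getD j 0 = c j) :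
    ∀ k, k ≤ n →
      (List.range k).foldl
        (fun (st : Nat × List Nat) j =>
          (if ((List.range n).map c).getD j 0 = 0 then j else st.1,
           st.2 ++ [if ((List.range n).map c).getD j 0 = 0 then j else st.1])) (0, [])
      = (pvLeftAt c (k - 1), (List.range k).map (pvLeftAt c)) := by
  intro k
  induction k with
  | zero => intro _; simp [pvLeftAt]
  | succ k ih =>
    intro hk
    rw [List.range_succ, List.foldl_append, ih (by omega)]
    simp only [List.foldl_cons, List.foldl_nil, List.map_append, List.map_cons, List.map_nil]
    rw [hc k (by omega)]
    have hstep : (if c k = 0 then k else pvLeftAt c (k - 1)) = pvLeftAt c k := by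
      cases k with
      | zero => simp [pvLeftAt]
      | succ p => simp [pvLeftAt]
    rw [hstep]
    simp

lemma rightFold (c : Nat → Int) (n : Nat)
    (hc : ∀ j, j < n → ((List.range n).map c).getD j 0 = c j) :
    ∀ k, k ≤ n → ∀ acc,
      (List.range k).reverse.foldl
        (fun (st : Nat × List Nat) j =>
          (if ((List.range n).map c).getD j 0 = 0 then j else st.1,
           (if ((List.range n).map c).getD j 0 = 0 then j else st.1) :: st.2))
        (pvRightAt c n k, acc)
      = (pvRightAt c n 0, (List.range k).map (pvRightAt c n) ++ acc) := by
  intro k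
  induction k with
  | zero => intro _ acc; simp
  | succ k ih =>
    intro hk acc
    have hrev : (List.range (k + 1)).reverse = k :: (List.range k).reverse := by
      rw [List.range_succ]; simp
    rw [hrev, List.foldl_cons]
    rw [hc k (by omega)]
    have hstep : (if c k = 0 then k else pvRightAt c n (k + 1)) = pvRightAt c n k := by
      rw [show pvRightAt c n k = if _h : k < n then (if c k = 0 then k else pvRightAt c n (k + 1)) else k from by rw [pvRightAt]]
      simp [show k < n by omega]
    rw [hstep, ih (by omega)]
    rw [List.range_succ]
    simp

-- ===== VERDICT (by name: the statement is the Claim_ definition above) =====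
-- the common normal form both ports reduce to
def pvCommon (c : Nat → Int) (n : Nat) : Int :=
  min ((List.range n).foldl
    (fun ans j =>
      if c j = pvM c n then
        max (max ans ((j : Int) - (pvLeftAt c j : Int))) ((pvRightAt c n j : Int) - (j : Int))
      else ans) 0) (pvM c n)

lemma sideA (box : List (List Int)) :
    box_calculate box = pvCommon (pvColLoop box) ((box.headD []).length) := by
  simp only [box_calculate, pvCommon]
  set c := pvColLoop box with hcdef
  set n := (box.headD []).length with hndef
  have h0 : ∀ j, 0 ≤ c j := by
    intro j; rw [hcdef, ← colCount_eq]; exact Int.natCast_nonneg _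
  rw [stateA c n]
  rw [List.foldl_filter]
  congr 1
  apply PySem.List.foldl_congr_mem
  intro acc j hjmem
  have hj : j < n := List.mem_range.mp hjmem
  by_cases hcj : c j = pvM c n
  · simp only [hcj, beq_self_eq_true, if_true]
    rw [walkL_eq c n h0 j hj, walkR_eq c n h0 j (le_of_lt hj)]
    have hL := leftAt_le c j
    have hR := rightAt_ge c n j
    rw [abs_of_nonneg (by omega : (0 : Int) ≤ (j : Int) - (pvLeftAt c j : Int))]
    rw [abs_sub_comm, abs_of_nonneg (by omega : (0 : Int) ≤ (pvRightAt c n j : Int) - (j : Int))]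
  · have hbeq : (pvM c n == c j) = false := by simp; omega
    simp [hbeq, hcj]

lemma sideB (box : List (List Int)) :
    box_calculate_alt box = pvCommon (pvColLoop box) ((box.headD []).length) := by
  simp only [box_calculate_alt, pvCommon]
  rw [List.map_congr_left (fun j _ => colCount_eq box j)]
  set c := pvColLoop box with hcdef
  set n := (box.headD []).length with hndef
  have hc : ∀ j, j < n → ((List.range n).map c).getD j 0 = c j :=
    fun j hj => PySem.List.getD_map_range c n j 0 hj
  rw [PySem.List.max?_id_cons]
  rw [leftFold c n hc n le_rfl]
  have hnn : pvRightAt c n n = n := by rw [pvRightAt]; simp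
  have hrf := rightFold c n hc n le_rfl []
  rw [hnn] at hrf
  rw [hrf]
  simp only [Option.getD_some, List.append_nil]
  rw [show ((List.range n).map c).foldl max 1 = pvM c n from rfl]
  congr 1
  apply PySem.List.foldl_congr_mem
  intro acc j hjmem
  have hj : j < n := List.mem_range.mp hjmem
  rw [hc j hj]
  by_cases hcj : c j = pvM c n
  · simp only [hcj, if_true]
    rw [PySem.List.getD_map_range (pvLeftAt c) n j 0 hj]
    rw [PySem.List.getD_map_range (pvRightAt c n) n j 0 hj]
  · simp [hcj]

-- ===== VERDICT (by name: the statement is the Claim_ definition above) =====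
theorem box_calculate_spec : Claim_equal_box_calculate := by
  intro box _ _
  unfold Spec_box_calculate
  rw [sideA, sideB]
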